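-- pv_equiv track=rewrite | github.com/mecuryD/Algo-Study | 2차/4주차/정경리/둘만의암호.py | solution
-- ===== SOURCE A (Python) =====
-- def solution(s, skip, index):
--     answer = ''
--
--     for i in s:
--         tmp = ord(i)
--         cnt = 0
--         flag = 0
--         while(True):
--             cnt += 1
--             tmp2 = ((tmp+cnt)-ord('a'))%26 + ord('a')
--             if chr(tmp2) in skip: # 해당 문자가 skip안에 있으면 flag를 증가시키지x
--                 continue
--             else: flag+=1
--             if flag==index: break
--
--
--         answer += chr(tmp2)
--     return answer
-- ===== SOURCE B (Python) =====
-- def solution(s, skip, index):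
--     out = []
--     for ch in s:
--         p0 = ord(ch) + 1
--         cands = [q for q in range(p0, p0 + 26)
--                  if chr((q - 97) % 26 + 97) not in skip]
--         pick = cands[(index - 1) % len(cands)]
--         out.append(chr((pick - 97) % 26 + 97))
--     return ''.join(out)
-- ===== Notes on version B (the rewrite author's own statement) =====
-- stated objective: faster
-- what changed: A walks letter by letter index times per character (an O(index*|skip|) inner while-loop); B reduces index modulo the number of allowed letters and picks the answer directly from the 26-letter window after the character, so per-character cost is a constant 26 regardless of index.
import Mathlib
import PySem

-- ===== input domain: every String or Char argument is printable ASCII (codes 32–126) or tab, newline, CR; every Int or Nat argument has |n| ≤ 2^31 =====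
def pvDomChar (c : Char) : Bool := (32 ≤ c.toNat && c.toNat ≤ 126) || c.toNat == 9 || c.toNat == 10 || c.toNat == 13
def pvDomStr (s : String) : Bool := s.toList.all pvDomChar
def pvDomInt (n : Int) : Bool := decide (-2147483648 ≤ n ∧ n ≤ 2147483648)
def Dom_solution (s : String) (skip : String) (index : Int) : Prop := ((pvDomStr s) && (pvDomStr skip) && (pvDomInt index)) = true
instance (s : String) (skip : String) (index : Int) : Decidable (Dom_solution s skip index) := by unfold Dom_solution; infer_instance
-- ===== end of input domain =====

-- B replaces A's per-character while-loop (index iterations) by reducing index modulo the number of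
-- allowed letters and indexing once into the 26-letter window after the character.

-- ===== PORT A =====
-- ((x)-ord('a'))%26 + ord('a') , Python's % on ints (floor mod)
def chrv (q : Int) : Int := PySem.Int.mod (q - 97) 26 + 97

-- A's 'while True' loop for one character: cnt/flag exactly as in A; ported with fuel
-- (Python's loop is unbounded; under Pre_solution it always breaks before this fuel runs out).
-- 'chr(tmp2) in skip' is a 1-character needle, so Python's substring test is character membership.
def loopA (skip : String) (index tmp : Int) : Nat → Int → Int → Int
  | 0, _, _ => 0
  | fuel+1, cnt, flag =>
    let cnt' := cnt + 1
    let tmp2 := chrv (tmp + cnt')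
    if skip.toList.contains (Char.ofNat tmp2.toNat) then
      loopA skip index tmp fuel cnt' flag
    else if flag + 1 = index then tmp2
    else loopA skip index tmp fuel cnt' (flag + 1)

def solution (s : String) (skip : String) (index : Int) : String :=
  String.mk (s.toList.map fun i =>
    Char.ofNat ((loopA skip index (i.toNat : Int) (26 * index.toNat + 26) 0 0).toNat))

-- ===== PORT B =====
-- 'chr((q-97)%26+97) not in skip' (1-character needle = membership)
def allowedC (skip : String) (q : Int) : Bool :=
  !(skip.toList.contains (Char.ofNat (chrv q).toNat))

def solution_alt (s : String) (skip : String) (index : Int) : String :=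
  String.mk (s.toList.map fun ch =>
    let p0 : Int := (ch.toNat : Int) + 1
    let cands := (PySem.List.pyRange p0 (p0 + 26) 1).filter (allowedC skip)
    let pick := cands.getD (PySem.Int.mod (index - 1) (cands.length : Int)).toNat 0
    Char.ofNat ((chrv pick).toNat))

-- ===== PRECONDITION & SPEC =====
-- Pre_ excludes exactly the inputs where A's while-loop never breaks (Python A diverges):
-- a nonempty s together with index < 1 or with every lowercase letter occurring in skip.
def Pre_solution (s : String) (skip : String) (index : Int) : Prop :=
  s.toList = [] ∨
  (1 ≤ index ∧
   ((List.range 26).any (fun r => !(skip.toList.contains (Char.ofNat (97 + r))))) = true)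

instance (s : String) (skip : String) (index : Int) : Decidable (Pre_solution s skip index) := by
  unfold Pre_solution; infer_instance

def pvWitness_solution : String × String × Int := ("ab z!", "bcd", 5)

def Spec_solution (s : String) (skip : String) (index : Int) (out : String) : Prop :=
  out = solution_alt s skip index
instance (s : String) (skip : String) (index : Int) (out : String) : Decidable (Spec_solution s skip index out) := by
  unfold Spec_solution; infer_instance

-- ===== CLAIM (what is proved, stated in full; the proofs are below) =====
def Claim_equal_solution : Prop := ∀ (s : String) (skip : String) (index : Int), Dom_solution s skip index → Pre_solution s skip index → Spec_solution s skip index (solution s skip index)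

-- ===== LEMMAS AND PROOFS =====

-- window of w consecutive integers starting at q
def win (q : Int) : Nat → List Int
  | 0 => []
  | w+1 => q :: win (q+1) w

-- allowed candidates in the window
def cnd (skip : String) (q : Int) (w : Nat) : List Int := (win q w).filter (allowedC skip)

-- clean reformulation of A's loop: scan from position q for the k-th allowed position
def scan (skip : String) : Nat → Int → Int → Int
  | 0, _, _ => 0
  | f+1, q, k =>
    if allowedC skip q then
      (if k = 1 then chrv q else scan skip f (q+1) (k-1))
    else scan skip f (q+1) k

theorem loopA_eq_scan (skip : String) (index tmp : Int) :
    ∀ (f : Nat) (cnt flag : Int),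
      loopA skip index tmp f cnt flag = scan skip f (tmp + cnt + 1) (index - flag) := by
  intro f
  induction f with
  | zero => intro cnt flag; rfl
  | succ f ih =>
      intro cnt flag
      have h1 : tmp + (cnt + 1) = tmp + cnt + 1 := by ring
      show (if skip.toList.contains (Char.ofNat (chrv (tmp + (cnt + 1))).toNat) then
              loopA skip index tmp f (cnt + 1) flag
            else if flag + 1 = index then chrv (tmp + (cnt + 1))
            else loopA skip index tmp f (cnt + 1) (flag + 1))
          = scan skip (f + 1) (tmp + cnt + 1) (index - flag)
      rw [h1]
      simp only [ih, scan, allowedC]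
      by_cases hc : skip.toList.contains (Char.ofNat (chrv (tmp + cnt + 1)).toNat)
      · simp only [hc, if_true, Bool.not_true, Bool.false_eq_true, if_false]
        congr 1 <;> ring
      · simp only [hc, Bool.false_eq_true, if_false, Bool.not_false, if_true]
        by_cases hf : flag + 1 = index
        · rw [if_pos hf, if_pos (by omega)]
        · rw [if_neg hf, if_neg (by omega)]
          congr 1 <;> ring

theorem chrv_shift (q : Int) : chrv (q + 26) = chrv q := by
  simp only [chrv, PySem.Int.mod_eq_emod_of_pos (by norm_num : (0:Int) < 26)]
  omega

theorem allowedC_shift (skip : String) (q : Int) : allowedC skip (q + 26) = allowedC skip q := by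
  simp [allowedC, chrv_shift]

theorem mem_win (x : Int) : ∀ (w : Nat) (q : Int), x ∈ win q w ↔ q ≤ x ∧ x < q + w := by
  intro w
  induction w with
  | zero => intro q; simp [win]
  | succ w ih => intro q; simp [win, ih (q+1)]; omega

theorem win_shift (c : Int) : ∀ (w : Nat) (q : Int), win (q + c) w = (win q w).map (· + c) := by
  intro w
  induction w with
  | zero => intro q; simp [win]
  | succ w ih =>
      intro q
      have h : q + c + 1 = q + 1 + c := by ring
      simp [win, h, ih (q+1)]

theorem win_eq_pyRange : ∀ (w : Nat) (q : Int), win q w = PySem.List.pyRange q (q + w) 1 := by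
  intro w
  induction w with
  | zero => intro q; simp [win, PySem.List.pyRange_one_eq_nil]
  | succ w ih =>
      intro q
      rw [PySem.List.pyRange_one_cons (by push_cast; omega)]
      have h : q + ((w : Int) + 1) = (q + 1) + (w : Int) := by ring
      push_cast
      rw [h]
      simp [win, ih (q+1)]

theorem cnd_shift (skip : String) (q : Int) (w : Nat) :
    cnd skip (q + 26) w = (cnd skip q w).map (· + 26) := by
  have hp : (allowedC skip ∘ (· + (26:Int))) = allowedC skip := by
    funext x; simp [allowedC_shift]
  rw [cnd, win_shift, List.filter_map, hp, cnd]

-- (W): stepping the scan over a whole window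
theorem scan_window (skip : String) :
    ∀ (w f : Nat) (q k : Int), ((cnd skip q w).length : Int) < k →
      scan skip (w + f) q k = scan skip f (q + w) (k - (cnd skip q w).length) := by
  intro w
  induction w with
  | zero => intro f q k _; simp [cnd, win]
  | succ w ih =>
      intro f q k hk
      have hwf : w + 1 + f = (w + f) + 1 := by omega
      rw [hwf]
      by_cases ha : allowedC skip q
      · have hcnd : cnd skip q (w+1) = q :: cnd skip (q+1) w := by
          simp [cnd, win, List.filter, ha]
        rw [hcnd] at hk ⊢
        simp only [List.length_cons] at hk ⊢
        have hk1 : k ≠ 1 := by push_cast at hk; omega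
        simp only [scan, ha, if_pos, if_neg hk1, Bool.true_eq_false]
        rw [ih f (q+1) (k-1) (by push_cast at hk ⊢; omega)]
        congr 1 <;> push_cast <;> ring
      · have hcnd : cnd skip q (w+1) = cnd skip (q+1) w := by
          simp [cnd, win, List.filter, ha]
        rw [hcnd] at hk ⊢
        simp only [scan, ha, Bool.false_eq_true, if_false]
        rw [ih f (q+1) k hk]
        congr 1 <;> push_cast <;> ring

-- (F): the scan finds the k-th candidate inside the window
theorem scan_find (skip : String) :
    ∀ (w f : Nat) (q k : Int), 1 ≤ k → k ≤ ((cnd skip q w).length : Int) → w ≤ f →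
      scan skip f q k = chrv ((cnd skip q w).getD (k - 1).toNat 0) := by
  intro w
  induction w with
  | zero => intro f q k h1 h2 _; simp [cnd, win] at h2; omega
  | succ w ih =>
      intro f q k h1 h2 hf
      obtain ⟨f', rfl⟩ : ∃ f', f = f' + 1 := ⟨f - 1, by omega⟩
      by_cases ha : allowedC skip q
      · have hcnd : cnd skip q (w+1) = q :: cnd skip (q+1) w := by
          simp [cnd, win, List.filter, ha]
        rw [hcnd] at h2 ⊢
        by_cases hk1 : k = 1
        · subst hk1
          simp [scan, ha]
        · simp only [scan, ha, if_pos, if_neg hk1]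
          rw [ih f' (q+1) (k-1) (by omega)
              (by simp only [List.length_cons] at h2; push_cast at h2 ⊢; omega) (by omega)]
          have ht : (k - 1).toNat = (k - 2).toNat + 1 := by omega
          have ht2 : (k - 1 - 1).toNat = (k - 2).toNat := by omega
          rw [ht, ht2]
          simp [List.getD]
      · have hcnd : cnd skip q (w+1) = cnd skip (q+1) w := by
          simp [cnd, win, List.filter, ha]
        rw [hcnd] at h2 ⊢
        simp only [scan, ha, Bool.false_eq_true, if_false]
        exact ih f' (q+1) k h1 h2 (by omega)

theorem chrv_getD_map_shift (l : List Int) (i : Nat) :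
    chrv ((l.map (· + 26)).getD i 0) = chrv (l.getD i 0) := by
  by_cases h : i < l.length
  · rw [List.getD_eq_getElem _ _ (by simpa using h), List.getD_eq_getElem _ _ h]
    simp [chrv_shift]
  · rw [List.getD_eq_default _ _ (by simpa using not_lt.mp h),
        List.getD_eq_default _ _ (by simpa using not_lt.mp h)]

-- main: scan with modular reduction of the count
theorem scan_mod (skip : String) :
    ∀ (n : Nat) (q : Int) (f : Nat), 26 * (n + 1) ≤ f → 0 < (cnd skip q 26).length →
      scan skip f q ((n : Int) + 1) =
        chrv ((cnd skip q 26).getD (n % (cnd skip q 26).length) 0) := by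
  intro n
  induction n using Nat.strong_induction_on with
  | _ n IH =>
      intro q f hf hm
      set m := (cnd skip q 26).length with hmdef
      by_cases hlt : n < m
      · rw [scan_find skip 26 f q ((n : Int) + 1) (by omega)
            (by rw [← hmdef]; push_cast; omega) (by omega)]
        rw [Nat.mod_eq_of_lt hlt]
        congr 2
        omega
      · -- one whole window, then recurse
        have hm1 : 1 ≤ m := hm
        have hn1 : m ≤ n := by omega
        obtain ⟨f', rfl⟩ : ∃ f', f = 26 + f' := ⟨f - 26, by omega⟩
        rw [scan_window skip 26 f' q ((n : Int) + 1) (by rw [← hmdef]; push_cast; omega)]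
        have harg : ((n : Int) + 1) - ((cnd skip q 26).length : Int) = ((n - m : Nat) : Int) + 1 := by
          rw [← hmdef]; omega
        rw [harg]
        have hshift := cnd_shift skip q 26
        have hlen : (cnd skip (q + 26) 26).length = m := by rw [hshift, List.length_map]
        have hc26 : q + ((26 : Nat) : Int) = q + 26 := by norm_num
        rw [hc26, IH (n - m) (by omega) (q + 26) f' (by omega) (by omega), hlen, hshift,
            chrv_getD_map_shift]
        congr 2
        conv_lhs => rw [← Nat.add_mod_right (n - m) m, Nat.sub_add_cancel hn1]

theorem cnd_ne_empty (skip : String) (q : Int)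
    (h : ((List.range 26).any (fun r => !(skip.toList.contains (Char.ofNat (97 + r))))) = true) :
    0 < (cnd skip q 26).length := by
  simp only [List.any_eq_true, List.mem_range] at h
  obtain ⟨r, hr, hok⟩ := h
  set x : Int := q + ((97 + (r : Int)) - q) % 26 with hx
  have hd0 : 0 ≤ ((97 + (r : Int)) - q) % 26 := Int.emod_nonneg _ (by norm_num)
  have hd1 : ((97 + (r : Int)) - q) % 26 < 26 := Int.emod_lt_of_pos _ (by norm_num)
  have hmem : x ∈ win q 26 := by
    rw [mem_win]
    constructor
    · omega
    · push_cast; omega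
  have hres : (x - 97) % 26 = (r : Int) := by
    rw [hx]
    omega
  have hchr : chrv x = 97 + (r : Int) := by
    rw [chrv, PySem.Int.mod_eq_emod_of_pos (by norm_num : (0:Int) < 26), hres]
    ring
  have hxa : allowedC skip x = true := by
    rw [allowedC, hchr]
    have h97 : ((97 : Int) + (r : Int)).toNat = 97 + r := by omega
    rw [h97]
    simpa using hok
  have hxc : x ∈ cnd skip q 26 := by
    rw [cnd, List.mem_filter]
    exact ⟨hmem, hxa⟩
  exact List.length_pos_of_mem hxc

theorem char_eq (skip : String) (index : Int) (hidx : 1 ≤ index)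
    (hany : ((List.range 26).any (fun r => !(skip.toList.contains (Char.ofNat (97 + r))))) = true)
    (c : Char) :
    Char.ofNat ((loopA skip index (c.toNat : Int) (26 * index.toNat + 26) 0 0).toNat) =
    (let p0 : Int := (c.toNat : Int) + 1
     let cands := (PySem.List.pyRange p0 (p0 + 26) 1).filter (allowedC skip)
     let pick := cands.getD (PySem.Int.mod (index - 1) (cands.length : Int)).toNat 0
     Char.ofNat ((chrv pick).toNat)) := by
  set q : Int := (c.toNat : Int) + 1 with hqdef
  set n : Nat := (index - 1).toNat with hndef
  have hm := cnd_ne_empty skip q hany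
  set m := (cnd skip q 26).length with hmdef
  have hrange : PySem.List.pyRange q (q + 26) 1 = win q 26 := by
    rw [win_eq_pyRange 26 q]
    norm_num
  have hcands : (PySem.List.pyRange q (q + 26) 1).filter (allowedC skip) = cnd skip q 26 := by
    rw [hrange, cnd]
  show Char.ofNat ((loopA skip index (c.toNat : Int) (26 * index.toNat + 26) 0 0).toNat) =
    Char.ofNat ((chrv (((PySem.List.pyRange q (q + 26) 1).filter (allowedC skip)).getD
      (PySem.Int.mod (index - 1)
        ((((PySem.List.pyRange q (q + 26) 1).filter (allowedC skip)).length : Nat) : Int)).toNat 0)).toNat)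
  rw [hcands, loopA_eq_scan]
  have hq0 : (c.toNat : Int) + 0 + 1 = q := by rw [hqdef]; ring
  have hi0 : index - 0 = (n : Int) + 1 := by omega
  rw [hq0, hi0, scan_mod skip n q (26 * index.toNat + 26) (by omega) hm]
  have hmodv : (PySem.Int.mod (index - 1) ((m : Nat) : Int)).toNat = n % m := by
    rw [PySem.Int.mod_eq_emod_of_pos (by exact_mod_cast hm)]
    have h1 : index - 1 = (n : Int) := by omega
    rw [h1]
    have h2 : ((n : Int)) % ((m : Int)) = (((n % m : Nat)) : Int) := by norm_cast
    rw [h2]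
    exact Int.toNat_natCast _
  rw [← hmdef, hmodv]

-- ===== VERDICT (by name: the statement is the Claim_ definition above) =====
theorem solution_spec : Claim_equal_solution := by
  unfold Claim_equal_solution
  intro s skip index _hdom hpre
  unfold Spec_solution solution solution_alt
  rcases hpre with hnil | ⟨hidx, hany⟩
  · rw [hnil]; rfl
  · congr 1
    exact List.map_congr_left (fun c _ => char_eq skip index hidx hany c)
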